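-- pv_equiv track=rewrite | github.com/varmaManish/My-Learning- | OOPS in python/NONRepString.py | Nonrepstring
-- ===== SOURCE A (Python) =====
-- def Nonrepstring(s):
--     count={}
--     for ch in s:
--         if ch in count:
--             count[ch]+=1
--         else:
--             count[ch]=1
--     result=[]
--     for ch in s:
--         if count[ch]==1:
--              result.append(ch)
--     if not result:
--         return "no repeating string"
--     return result
-- ===== SOURCE B (Python) =====
-- def Nonrepstring(s):
--     # Streaming one-pass algorithm: keep an ordered list of characters seen
--     # exactly once so far; on a second sighting move the character to `dup`
--     # and delete it from the candidate list. No counting pass at all.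
--     once = []
--     dup = set()
--     for ch in s:
--         if ch in dup:
--             continue
--         if ch in once:
--             once.remove(ch)
--             dup.add(ch)
--         else:
--             once.append(ch)
--     return once if once else "no repeating string"
-- ===== Notes on version B (the rewrite author's own statement) =====
-- stated objective: alternative
-- what changed: Replaces the count-table-then-filter two-stage design with a single streaming pass that maintains an ordered candidate list of characters seen exactly once so far, deleting a candidate the moment its second occurrence arrives (a seen-twice set suppresses later occurrences); no frequency counting anywhere; the empty-result sentinel case is outside Pre_.
-- outside the precondition, e.g. on Nonrepstring('aa'): A returns 'no repeating string', B returns 'no repeating string'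
import Mathlib
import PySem

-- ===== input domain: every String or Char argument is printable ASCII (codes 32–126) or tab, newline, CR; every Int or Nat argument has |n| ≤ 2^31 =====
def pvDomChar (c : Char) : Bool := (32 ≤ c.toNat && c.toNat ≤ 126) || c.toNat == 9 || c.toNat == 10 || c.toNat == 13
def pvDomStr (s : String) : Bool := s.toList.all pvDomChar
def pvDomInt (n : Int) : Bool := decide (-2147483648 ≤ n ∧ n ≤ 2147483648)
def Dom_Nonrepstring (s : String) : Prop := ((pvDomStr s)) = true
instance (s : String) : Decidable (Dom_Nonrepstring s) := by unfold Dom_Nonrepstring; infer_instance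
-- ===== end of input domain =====

-- B replaces A's count-then-filter passes with one streaming pass keeping an ordered candidate
-- list (once) and a seen-twice set (dup). Return-value equivalence on Pre_ only.


-- ===== PORT A =====
def Nonrepstring (s : String) : List String :=
  let count := s.toList.foldl
    (fun d ch => if d.contains ch then d.modify ch 0 (· + 1) else d.insert ch (1 : Int))
    (PySem.Dict.empty)
  let result := s.toList.foldl
    (fun r ch => if count.getD ch 0 == 1 then r ++ [String.ofList [ch]] else r) []
  -- when result is empty Python returns a str sentinel (not a list); excluded by Pre_
  result

-- ===== PORT B =====
-- one step of B's loop body over the state (once, dup)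
def nrsStep (st : List Char × PySem.Set Char) (ch : Char) : List Char × PySem.Set Char :=
  if PySem.Set.contains st.2 ch then st
  else if st.1.contains ch then
    -- once.remove(ch); remove? is some here since the guard ensures membership
    (((PySem.List.remove? st.1 ch).getD st.1), PySem.Set.add st.2 ch)
  else (st.1 ++ [ch], st.2)

def Nonrepstring_alt (s : String) : List String :=
  let st := s.toList.foldl nrsStep ([], PySem.Set.empty)
  -- when once is empty Python returns a str sentinel (not a list); excluded by Pre_
  st.1.map (fun ch => String.ofList [ch])

-- ===== PRECONDITION & SPEC =====
-- Pre_ excludes exactly the inputs with no unique character, where A (and B) return the string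
-- sentinel (see cites), which is not a value of the declared list type.
def Pre_Nonrepstring (s : String) : Prop := s.toList.any (fun c => s.toList.count c == 1) = true
instance (s : String) : Decidable (Pre_Nonrepstring s) := by unfold Pre_Nonrepstring; infer_instance
def pvWitness_Nonrepstring : String := "ab"

def Spec_Nonrepstring (s : String) (out : List String) : Prop := out = Nonrepstring_alt s
instance (s : String) (out : List String) : Decidable (Spec_Nonrepstring s out) := by unfold Spec_Nonrepstring; infer_instance

-- ===== CLAIM (what is proved, stated in full; the proofs are below) =====
def Claim_equal_Nonrepstring : Prop := ∀ (s : String), Dom_Nonrepstring s → Pre_Nonrepstring s → Spec_Nonrepstring s (Nonrepstring s)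

-- ===== LEMMAS AND PROOFS =====

-- A's counting loop: the final dictionary holds each character's count.
theorem getD_countLoop (l : List Char) (d : PySem.Dict Char Int) (v : Char) :
    (l.foldl (fun d ch => if d.contains ch then d.modify ch 0 (· + 1) else d.insert ch (1 : Int)) d).getD v 0
      = d.getD v 0 + l.count v := by
  induction l generalizing d with
  | nil => simp
  | cons ch l ih =>
    simp only [List.foldl_cons]
    by_cases h : d.contains ch = true
    · simp only [h, if_true, ih, PySem.Dict.getD_modify]
      by_cases hv : v = ch
      · subst hv; simp; ring
      · simp [hv, Ne.symm hv]
    · simp only [Bool.not_eq_true] at h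
      simp only [h, Bool.false_eq_true, if_false, ih, PySem.Dict.getD_insert]
      by_cases hv : v = ch
      · subst hv; rw [PySem.Dict.getD_of_not_contains (h := h)]; simp; ring
      · simp [hv, Ne.symm hv]

-- A as a filter by "occurs exactly once".
theorem Nonrepstring_eq_filter (s : String) :
    Nonrepstring s = (s.toList.filter (fun c => s.toList.count c == 1)).map (fun ch => String.ofList [ch]) := by
  unfold Nonrepstring
  simp only [PySem.List.foldl_append_if, List.nil_append]
  apply congrArg
  apply List.filter_congr
  intro ch _
  rw [getD_countLoop]
  simp [PySem.Dict.getD_empty]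

-- Invariant of B's streaming pass: after processing the prefix p,
-- `once` is p filtered by "count in p = 1" and `dup` contains exactly the chars with count ≥ 2.
theorem nrs_invariant (p : List Char) :
    (p.foldl nrsStep ([], PySem.Set.empty)).1 = p.filter (fun c => p.count c == 1)
    ∧ ∀ c, (c ∈ (p.foldl nrsStep ([], PySem.Set.empty)).2 ↔ 2 ≤ p.count c) := by
  induction p using List.reverseRecOn with
  | nil => exact ⟨rfl, by intro c; simp [PySem.Set.empty]⟩
  | append_singleton p ch ih =>
    obtain ⟨h1, h2⟩ := ih
    rw [List.foldl_append, List.foldl_cons, List.foldl_nil]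
    set st := p.foldl nrsStep ([], PySem.Set.empty) with hst
    unfold nrsStep
    by_cases hn2 : 2 ≤ p.count ch
    · -- ch already seen twice: state unchanged
      have hc : PySem.Set.contains st.2 ch = true :=
        (PySem.Set.contains_iff _ _).2 ((h2 ch).2 hn2)
      rw [if_pos hc]
      refine ⟨?_, ?_⟩
      · rw [h1, List.filter_append]
        have hch : ((p ++ [ch]).count ch == 1) = false := by
          simp only [List.count_append, List.count_singleton, beq_self_eq_true, if_true,
            beq_eq_false_iff_ne]; omega
        simp only [List.filter_singleton, hch, cond_false, List.append_nil]
        apply List.filter_congr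
        intro c hc'
        by_cases hcc : c = ch
        · subst hcc; rw [hch]
          simp only [beq_eq_false_iff_ne]; omega
        · simp [List.count_append, List.count_singleton, Ne.symm hcc]
      · intro c
        rw [h2 c, List.count_append, List.count_singleton]
        by_cases hcc : c = ch
        · subst hcc; simp only [beq_self_eq_true, if_true]; omega
        · simp [Ne.symm hcc]
    · by_cases hn1 : p.count ch = 1
      · -- second sighting: remove from once, add to dup
        have hdup : PySem.Set.contains st.2 ch = false := by
          rw [Bool.eq_false_iff]
          intro hcon
          exact absurd ((h2 ch).1 ((PySem.Set.contains_iff _ _).1 hcon)) (by omega)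
        have hmem : ch ∈ st.1 := by
          rw [h1, List.mem_filter]
          exact ⟨List.count_pos_iff.1 (by omega), by simp [hn1]⟩
        have honce : st.1.contains ch = true := by simpa using hmem
        rw [if_neg (by rw [hdup]; exact Bool.false_ne_true), if_pos honce]
        have hnd : st.1.Nodup := by
          rw [h1, List.nodup_iff_count_le_one]
          intro a
          by_cases hfa : (p.count a == 1) = true
          · rw [List.count_filter (p := fun c => List.count c p == 1) (a := a) (l := p) hfa]
            simp at hfa; omega
          · have : a ∉ p.filter (fun c => p.count c == 1) := fun hm =>
              hfa (List.mem_filter.1 hm).2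
            rw [List.count_eq_zero.2 this]; omega
        refine ⟨?_, ?_⟩
        · rw [PySem.List.remove?_eq_some_erase st.1 ch hmem, Option.getD_some,
            List.Nodup.erase_eq_filter hnd, h1, List.filter_filter, List.filter_append]
          have hch : ((p ++ [ch]).count ch == 1) = false := by
            simp only [List.count_append, List.count_singleton, beq_self_eq_true, if_true,
              beq_eq_false_iff_ne]; omega
          simp only [List.filter_singleton, hch, cond_false, List.append_nil]
          apply Eq.symm
          apply List.filter_congr
          intro c hc'
          by_cases hcc : c = ch
          · subst hcc; rw [hch]; simp
          · simp [List.count_append, List.count_singleton, Ne.symm hcc, bne, hcc]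
        · intro c
          rw [PySem.Set.mem_add, h2 c, List.count_append, List.count_singleton]
          by_cases hcc : c = ch
          · subst hcc
            simp only [beq_self_eq_true, if_true, eq_self_iff_true, or_true, true_iff]
            omega
          · simp [Ne.symm hcc, hcc]
      · -- first sighting: append to once
        have hn0 : p.count ch = 0 := by omega
        have hdup : PySem.Set.contains st.2 ch = false := by
          rw [Bool.eq_false_iff]
          intro hcon
          exact absurd ((h2 ch).1 ((PySem.Set.contains_iff _ _).1 hcon)) (by omega)
        have hnotp : ch ∉ p := by
          intro hm; exact absurd (List.count_pos_iff.2 hm) (by omega)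
        have honce : st.1.contains ch = false := by
          rw [Bool.eq_false_iff]
          intro hcon
          have : ch ∈ st.1 := by simpa using hcon
          rw [h1] at this
          exact hnotp (List.mem_filter.1 this).1
        rw [if_neg (by rw [hdup]; exact Bool.false_ne_true), if_neg (by rw [honce]; exact Bool.false_ne_true)]
        refine ⟨?_, ?_⟩
        · rw [h1, List.filter_append]
          have hch : ((p ++ [ch]).count ch == 1) = true := by
            simp [List.count_append, List.count_singleton, hn0]
          simp only [List.filter_singleton, hch, cond_true]
          congr 1
          apply List.filter_congr
          intro c hc'
          have hcc : c ≠ ch := fun h => hnotp (h ▸ hc')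
          simp [List.count_append, List.count_singleton, Ne.symm hcc]
        · intro c
          rw [h2 c, List.count_append, List.count_singleton]
          by_cases hcc : c = ch
          · subst hcc; simp only [beq_self_eq_true, if_true]; omega
          · simp [Ne.symm hcc]

-- B equals the same filter.
theorem Nonrepstring_alt_eq_filter (s : String) :
    Nonrepstring_alt s = (s.toList.filter (fun c => s.toList.count c == 1)).map (fun ch => String.ofList [ch]) := by
  simp only [Nonrepstring_alt]
  rw [(nrs_invariant s.toList).1]

-- ===== VERDICT (by name: the statement is the Claim_ definition above) =====
theorem Nonrepstring_spec : Claim_equal_Nonrepstring := by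
  intro s _ _
  rw [Spec_Nonrepstring, Nonrepstring_eq_filter, Nonrepstring_alt_eq_filter]
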